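-- pv_equiv track=rewrite | github.com/dead-persimmon/sashok | sashok_tools.py | separate_tags
-- ===== SOURCE A (Python) =====
-- def separate_tags(string, brackets = '[]'):
--     tags = []
--     while True:
--         opening_index = string.find(brackets[0])
--         if opening_index > -1:
--             balance = 0
--             for index, char in enumerate(string[opening_index:]):
--                 if char == brackets[0]: balance += 1
--                 elif char == brackets[1]: balance -= 1
--                 if balance == 0:
--                     closing_index = opening_index + index
--                     tags.append(string[opening_index+1:closing_index])
--                     string = string[:opening_index] + string[closing_index+1:]
--                     break
--             if balance != 0:
--                 return string, None
--         else: break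
--     return string, tags
-- ===== SOURCE B (Python) =====
-- def separate_tags(string, brackets = '[]'):
--     res = []
--     tags = []
--     buf = []
--     depth = 0
--     for char in string:
--         if char == brackets[0]:
--             if depth == 0:
--                 buf = []
--             else:
--                 buf.append(char)
--             depth += 1
--         elif depth > 0 and char == brackets[1]:
--             depth -= 1
--             if depth == 0:
--                 tags.append(''.join(buf))
--             else:
--                 buf.append(char)
--         elif depth > 0:
--             buf.append(char)
--         else:
--             res.append(char)
--     if depth > 0:
--         return ''.join(res) + brackets[0] + ''.join(buf), None
--     return ''.join(res), tags
-- ===== Notes on version B (the rewrite author's own statement) =====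
-- stated objective: alternative
-- what changed: A repeatedly re-finds the first opening bracket, rescans from it for the matching close and rebuilds the string by slicing each round; B makes one left-to-right pass with a depth counter, routing each character into the remaining text, the current group buffer, or the tag list.
import Mathlib
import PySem

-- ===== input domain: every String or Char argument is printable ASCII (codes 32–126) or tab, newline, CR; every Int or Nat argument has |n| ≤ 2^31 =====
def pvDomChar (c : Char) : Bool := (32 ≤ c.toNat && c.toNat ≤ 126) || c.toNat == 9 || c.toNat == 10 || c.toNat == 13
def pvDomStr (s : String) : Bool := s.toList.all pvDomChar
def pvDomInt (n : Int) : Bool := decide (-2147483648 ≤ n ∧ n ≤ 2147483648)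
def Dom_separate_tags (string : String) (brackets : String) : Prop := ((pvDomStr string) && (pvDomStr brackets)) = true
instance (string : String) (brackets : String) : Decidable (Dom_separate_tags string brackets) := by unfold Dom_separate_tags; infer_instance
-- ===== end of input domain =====

-- B replaces A's repeated find / rescan / re-slice rounds by a single left-to-right pass with
-- a depth counter (objective: alternative — a genuinely different traversal of the string).

-- ===== PORT A =====
-- A-side helper: the inner `for index, char in enumerate(string[opening_index:])` loop with its
-- break: relative index at which `balance` hits 0; none = the loop ran out (balance ≠ 0).
def pvScanA (b0 b1 : Char) (balance : Int) (l : List Char) : Option Nat :=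
  match l with
  | [] => none
  | ch :: rest =>
    let balance := if ch = b0 then balance + 1 else if ch = b1 then balance - 1 else balance
    if balance = 0 then some 0 else (pvScanA b0 b1 balance rest).map (· + 1)

-- termination fact for the outer while-loop: a found opening bracket lies inside the string
theorem pvFind_lt {s : List Char} {b0 : Char} (h : PySem.Chars.find s [b0] > -1) :
    (PySem.Chars.find s [b0]).toNat < s.length := by
  have h0 : 0 ≤ PySem.Chars.find s [b0] := by omega
  obtain ⟨hp, -⟩ := PySem.Chars.find_spec (s := s) (sub := [b0]) h0
  obtain ⟨t, ht⟩ := hp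
  have hne : s.drop (PySem.Chars.find s [b0]).toNat ≠ [] := by rw [← ht]; simp
  by_contra hc
  simp [List.drop_eq_nil_iff] at hne
  omega

-- the `while True` loop of A; `tags` is the accumulator, the pair is A's `return`
def pvLoopA (b0 b1 : Char) (s : List Char) (tags : List String) :
    List Char × Option (List String) :=
  if h : PySem.Chars.find s [b0] > -1 then
    match pvScanA b0 b1 0 (PySem.List.slice s (some (PySem.Chars.find s [b0])) none) with
    | some k =>
        -- closing_index = opening_index + k;  string = string[:oi] + string[ci+1:]
        pvLoopA b0 b1
          (PySem.List.slice s none (some (PySem.Chars.find s [b0])) ++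
           PySem.List.slice s (some (PySem.Chars.find s [b0] + k + 1)) none)
          (tags ++ [String.ofList
            (PySem.List.slice s (some (PySem.Chars.find s [b0] + 1))
              (some (PySem.Chars.find s [b0] + k)))])
    | none => (s, none)
  else (s, some tags)
termination_by s.length
decreasing_by
  have h0 : (0:Int) ≤ PySem.Chars.find s [b0] := by omega
  have hlt := pvFind_lt h
  rw [PySem.List.slice_to s h0, PySem.List.slice_from s (by omega : (0:Int) ≤ PySem.Chars.find s [b0] + k + 1)]
  have hk : (PySem.Chars.find s [b0] + (k:Int) + 1).toNat = (PySem.Chars.find s [b0]).toNat + k + 1 := by omega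
  simp [List.length_take, List.length_drop, hk]
  omega

-- brackets[0] / brackets[1]: Pre_ guarantees they exist whenever A's control flow reads them
def separate_tags (string : String) (brackets : String) : String × Option (List String) :=
  let b0 := brackets.toList.getD 0 default
  let b1 := brackets.toList.getD 1 default
  let r := pvLoopA b0 b1 string.toList []
  (String.ofList r.1, r.2)

-- ===== PORT B =====
-- one step of B's single pass; state = (res, depth, buf, tags)
def pvStepB (b0 b1 : Char) (st : List Char × Nat × List Char × List String) (ch : Char) :
    List Char × Nat × List Char × List String :=
  match st with
  | (res, depth, buf, tags) =>
    if ch = b0 then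
      (res, depth + 1, if depth = 0 then [] else buf ++ [ch], tags)
    else if 0 < depth ∧ ch = b1 then
      if depth - 1 = 0 then (res, depth - 1, buf, tags ++ [String.ofList buf])
      else (res, depth - 1, buf ++ [ch], tags)
    else if 0 < depth then (res, depth, buf ++ [ch], tags)
    else (res ++ [ch], depth, buf, tags)

-- B's final `return`
def pvFinishB (b0 : Char) (st : List Char × Nat × List Char × List String) :
    String × Option (List String) :=
  match st with
  | (res, depth, buf, tags) =>
    if 0 < depth then (String.ofList (res ++ b0 :: buf), none) else (String.ofList res, some tags)

def separate_tags_alt (string : String) (brackets : String) : String × Option (List String) :=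
  let b0 := brackets.toList.getD 0 default
  let b1 := brackets.toList.getD 1 default
  pvFinishB b0 (string.toList.foldl (pvStepB b0 b1) ([], 0, [], []))

-- ===== PRECONDITION & SPEC =====
-- Pre_ excludes exactly the inputs where A raises IndexError: empty `brackets`, and a
-- single-character `brackets` when a different character follows the first occurrence of that
-- character in `string` (then A reads brackets[1]).
def Pre_separate_tags (string : String) (brackets : String) : Prop :=
  brackets.toList ≠ [] ∧
    (brackets.toList.length = 1 →
      (string.toList.dropWhile (· ≠ brackets.toList.getD 0 default)).all
        (· = brackets.toList.getD 0 default) = true)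
instance (string : String) (brackets : String) : Decidable (Pre_separate_tags string brackets) := by
  unfold Pre_separate_tags; infer_instance

def pvWitness_separate_tags : String × String := ("a[b[c]]d[e]", "[]")

def Spec_separate_tags (string : String) (brackets : String) (out : String × Option (List String)) : Prop := out = separate_tags_alt string brackets
instance (string : String) (brackets : String) (out : String × Option (List String)) : Decidable (Spec_separate_tags string brackets out) := by unfold Spec_separate_tags; infer_instance

-- ===== CLAIM (what is proved, stated in full; the proofs are below) =====
def Claim_equal_separate_tags : Prop := ∀ (string : String) (brackets : String), Dom_separate_tags string brackets → Pre_separate_tags string brackets → Spec_separate_tags string brackets (separate_tags string brackets)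

-- ===== LEMMAS AND PROOFS =====

theorem pvStepB_open {b0 : Char} (b1 : Char) {ch : Char} (h : ch = b0) {d : Nat} (hd : 0 < d)
    (res buf : List Char) (tags : List String) :
    pvStepB b0 b1 (res, d, buf, tags) ch = (res, d + 1, buf ++ [ch], tags) := by
  simp [pvStepB, h]; omega

theorem pvStepB_open0 {b0 : Char} (b1 : Char) {ch : Char} (h : ch = b0)
    (res buf : List Char) (tags : List String) :
    pvStepB b0 b1 (res, 0, buf, tags) ch = (res, 1, [], tags) := by
  simp [pvStepB, h]

theorem pvStepB_close1 {b0 b1 ch : Char} (h0 : ch ≠ b0) (h1 : ch = b1)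
    (res buf : List Char) (tags : List String) :
    pvStepB b0 b1 (res, 1, buf, tags) ch = (res, 0, buf, tags ++ [String.ofList buf]) := by
  simp only [pvStepB]
  rw [if_neg h0, if_pos (⟨Nat.one_pos, h1⟩ : 0 < 1 ∧ ch = b1)]
  simp

theorem pvStepB_close {b0 b1 ch : Char} (h0 : ch ≠ b0) (h1 : ch = b1) {d : Nat} (hd : 2 ≤ d)
    (res buf : List Char) (tags : List String) :
    pvStepB b0 b1 (res, d, buf, tags) ch = (res, d - 1, buf ++ [ch], tags) := by
  simp only [pvStepB]
  rw [if_neg h0, if_pos (⟨by omega, h1⟩ : 0 < d ∧ ch = b1), if_neg (by omega : ¬ (d - 1 = 0))]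

theorem pvStepB_in {b0 b1 ch : Char} (h0 : ch ≠ b0) (h1 : ch ≠ b1) {d : Nat} (hd : 0 < d)
    (res buf : List Char) (tags : List String) :
    pvStepB b0 b1 (res, d, buf, tags) ch = (res, d, buf ++ [ch], tags) := by
  simp only [pvStepB]
  rw [if_neg h0, if_neg (fun h => h1 h.2 : ¬ (0 < d ∧ ch = b1)), if_pos hd]

theorem pvStepB_out {b0 b1 ch : Char} (h0 : ch ≠ b0)
    (res buf : List Char) (tags : List String) :
    pvStepB b0 b1 (res, 0, buf, tags) ch = (res ++ [ch], 0, buf, tags) := by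
  simp [pvStepB, h0]

theorem pvFoldB_inner_none (b0 b1 : Char) (r : List Char) :
    ∀ (d : Nat) (buf : List Char), 0 < d → pvScanA b0 b1 (d : Int) r = none →
      ∀ (res : List Char) (acc : List String),
        ∃ d', 0 < d' ∧ r.foldl (pvStepB b0 b1) (res, d, buf, acc) = (res, d', buf ++ r, acc) := by
  induction r with
  | nil => intro d buf hd _ res acc; exact ⟨d, hd, by simp⟩
  | cons ch rest ih =>
    intro d buf hd hscan res acc
    simp only [pvScanA] at hscan
    by_cases hc0 : ch = b0
    · rw [if_pos hc0, if_neg (by omega : ¬ ((d:Int) + 1 = 0))] at hscan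
      simp only [Option.map_eq_none_iff] at hscan
      rw [show (d:Int) + 1 = ((d+1 : Nat) : Int) by push_cast; ring] at hscan
      rw [List.foldl_cons, pvStepB_open b1 hc0 hd]
      obtain ⟨d', hd', heq⟩ := ih (d+1) (buf ++ [ch]) (by omega) hscan res acc
      exact ⟨d', hd', by rw [heq]; simp⟩
    · by_cases hc1 : ch = b1
      · rw [if_neg hc0, if_pos hc1] at hscan
        by_cases hd1 : d = 1
        · exfalso; rw [hd1] at hscan; simp at hscan
        · rw [if_neg (by omega : ¬ ((d:Int) - 1 = 0))] at hscan
          simp only [Option.map_eq_none_iff] at hscan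
          rw [show (d:Int) - 1 = ((d-1 : Nat) : Int) by omega] at hscan
          rw [List.foldl_cons, pvStepB_close hc0 hc1 (by omega)]
          obtain ⟨d', hd', heq⟩ := ih (d-1) (buf ++ [ch]) (by omega) hscan res acc
          exact ⟨d', hd', by rw [heq]; simp⟩
      · rw [if_neg hc0, if_neg hc1, if_neg (by omega : ¬ ((d:Int) = 0))] at hscan
        simp only [Option.map_eq_none_iff] at hscan
        rw [List.foldl_cons, pvStepB_in hc0 hc1 hd]
        obtain ⟨d', hd', heq⟩ := ih d (buf ++ [ch]) hd hscan res acc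
        exact ⟨d', hd', by rw [heq]; simp⟩

theorem pvFoldB_inner_some (b0 b1 : Char) (r : List Char) :
    ∀ (d : Nat) (buf : List Char) (j : Nat), 0 < d → pvScanA b0 b1 (d : Int) r = some j →
      ∀ (res : List Char) (acc : List String),
        r.foldl (pvStepB b0 b1) (res, d, buf, acc) =
          (r.drop (j + 1)).foldl (pvStepB b0 b1)
            (res, 0, buf ++ r.take j, acc ++ [String.ofList (buf ++ r.take j)]) := by
  induction r with
  | nil => intro d buf j _ hscan; simp [pvScanA] at hscan
  | cons ch rest ih =>
    intro d buf j hd hscan res acc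
    simp only [pvScanA] at hscan
    by_cases hc0 : ch = b0
    · rw [if_pos hc0, if_neg (by omega : ¬ ((d:Int) + 1 = 0))] at hscan
      obtain ⟨j', hj', rfl⟩ : ∃ j', pvScanA b0 b1 ((d:Int)+1) rest = some j' ∧ j = j' + 1 := by
        cases hsc : pvScanA b0 b1 ((d:Int)+1) rest <;> rw [hsc] at hscan <;> simp at hscan
        · exact ⟨_, rfl, hscan.symm⟩
      rw [show (d:Int) + 1 = ((d+1 : Nat) : Int) by push_cast; ring] at hj'
      rw [List.foldl_cons, pvStepB_open b1 hc0 hd]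
      rw [ih (d+1) (buf ++ [ch]) j' (by omega) hj' res acc]
      simp
    · by_cases hc1 : ch = b1
      · rw [if_neg hc0, if_pos hc1] at hscan
        by_cases hd1 : d = 1
        · subst hd1
          rw [show ((1:Nat):Int) - 1 = 0 by norm_num, if_pos rfl] at hscan
          have hj : j = 0 := by simpa using hscan.symm
          subst hj
          rw [List.foldl_cons, pvStepB_close1 hc0 hc1]
          simp
        · rw [if_neg (by omega : ¬ ((d:Int) - 1 = 0))] at hscan
          obtain ⟨j', hj', rfl⟩ : ∃ j', pvScanA b0 b1 ((d:Int)-1) rest = some j' ∧ j = j' + 1 := by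
            cases hsc : pvScanA b0 b1 ((d:Int)-1) rest <;> rw [hsc] at hscan <;> simp at hscan
            · exact ⟨_, rfl, hscan.symm⟩
          rw [show (d:Int) - 1 = ((d-1 : Nat) : Int) by omega] at hj'
          rw [List.foldl_cons, pvStepB_close hc0 hc1 (by omega)]
          rw [ih (d-1) (buf ++ [ch]) j' (by omega) hj' res acc]
          simp
      · rw [if_neg hc0, if_neg hc1, if_neg (by omega : ¬ ((d:Int) = 0))] at hscan
        obtain ⟨j', hj', rfl⟩ : ∃ j', pvScanA b0 b1 (d:Int) rest = some j' ∧ j = j' + 1 := by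
          cases hsc : pvScanA b0 b1 (d:Int) rest <;> rw [hsc] at hscan <;> simp at hscan
          · exact ⟨_, rfl, hscan.symm⟩
        rw [List.foldl_cons, pvStepB_in hc0 hc1 hd]
        rw [ih d (buf ++ [ch]) j' hd hj' res acc]
        simp

theorem pvFoldB_pass (b0 b1 : Char) (p : List Char) (hp : b0 ∉ p) :
    ∀ (res buf : List Char) (acc : List String),
      p.foldl (pvStepB b0 b1) (res, 0, buf, acc) = (res ++ p, 0, buf, acc) := by
  induction p with
  | nil => simp
  | cons c t ih =>
    intro res buf acc
    simp only [List.mem_cons, not_or] at hp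
    rw [List.foldl_cons, pvStepB_out (fun h => hp.1 h.symm), ih hp.2]
    simp

-- a successful find: no b0 before index i = find.toNat, and b0 at index i
theorem pvFindDecomp (s : List Char) (b0 : Char) (h : PySem.Chars.find s [b0] > -1) :
    b0 ∉ s.take (PySem.Chars.find s [b0]).toNat ∧
      s.drop (PySem.Chars.find s [b0]).toNat =
        b0 :: s.drop ((PySem.Chars.find s [b0]).toNat + 1) := by
  have h0 : 0 ≤ PySem.Chars.find s [b0] := by omega
  obtain ⟨hp, hmin⟩ := PySem.Chars.find_spec (s := s) (sub := [b0]) h0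
  obtain ⟨t, ht⟩ := hp
  set i := (PySem.Chars.find s [b0]).toNat with hi
  have hlt : i < s.length := pvFind_lt h
  constructor
  · intro hmem
    obtain ⟨k, hk, hget⟩ := List.getElem_of_mem hmem
    have hk' : k < i := by
      have h2 := hk; rw [List.length_take] at h2; omega
    have hkl : k < s.length := by omega
    have hgk : (s.take i)[k] = s[k] := List.getElem_take ..
    refine hmin k hk' ⟨s.drop (k+1), ?_⟩
    rw [List.drop_eq_getElem_cons hkl]
    simp [← hget, hgk]
  · have htail : s.drop (i+1) = t := by
      have h3 := congrArg List.tail ht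
      rw [List.tail_drop] at h3
      simpa using h3.symm
    rw [← ht, htail]
    rfl

-- a found bracket means membership
theorem pvFind_pos_iff (s : List Char) (b0 : Char) :
    PySem.Chars.find s [b0] > -1 ↔ b0 ∈ s := by
  constructor
  · intro h
    have h0 : 0 ≤ PySem.Chars.find s [b0] := by omega
    have := (PySem.Chars.find_nonneg_iff (s := s) (sub := [b0])).mp h0
    rw [List.singleton_infix_iff] at this
    exact this
  · intro h
    have : 0 ≤ PySem.Chars.find s [b0] :=
      (PySem.Chars.find_nonneg_iff (s := s) (sub := [b0])).mpr
        ((List.singleton_infix_iff b0 s).mpr h)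
    omega

-- the main invariant: one pass of B from depth 0 computes A's loop, prefixed by `res`
theorem pvMain (b0 b1 : Char) : ∀ (n : Nat) (s : List Char), s.length ≤ n →
    ∀ (res buf : List Char) (acc : List String),
      pvFinishB b0 (s.foldl (pvStepB b0 b1) (res, 0, buf, acc)) =
        (String.ofList (res ++ (pvLoopA b0 b1 s acc).1), (pvLoopA b0 b1 s acc).2) := by
  intro n
  induction n with
  | zero =>
    intro s hs res buf acc
    have hs0 : s = [] := by cases s <;> simp_all
    subst hs0
    have hnf : ¬ PySem.Chars.find ([] : List Char) [b0] > -1 := by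
      rw [pvFind_pos_iff]; simp
    rw [pvLoopA, dif_neg hnf]
    simp [pvFinishB]
  | succ n IH =>
    intro s hs res buf acc
    by_cases h : PySem.Chars.find s [b0] > -1
    · have h0 : (0:Int) ≤ PySem.Chars.find s [b0] := by omega
      obtain ⟨hnotin, hdrop⟩ := pvFindDecomp s b0 h
      set i := (PySem.Chars.find s [b0]).toNat with hi
      have hlt : i < s.length := pvFind_lt h
      have hsplit : s = s.take i ++ b0 :: s.drop (i + 1) := by
        conv_lhs => rw [← List.take_append_drop i s]
        rw [hdrop]
      rw [pvLoopA, dif_pos h]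
      rw [PySem.List.slice_from s h0, ← hi, hdrop]
      rw [show pvScanA b0 b1 0 (b0 :: s.drop (i + 1)) =
            (pvScanA b0 b1 1 (s.drop (i + 1))).map (· + 1) from by simp [pvScanA]]
      cases hsc : pvScanA b0 b1 1 (s.drop (i + 1)) with
      | none =>
        simp only [Option.map_none]
        conv_lhs => rw [hsplit, List.foldl_append, pvFoldB_pass b0 b1 _ hnotin,
          List.foldl_cons, pvStepB_open0 b1 rfl]
        obtain ⟨d', hd', heq⟩ := pvFoldB_inner_none b0 b1 (s.drop (i+1)) 1 []
          Nat.one_pos (by exact_mod_cast hsc) (res ++ s.take i) acc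
        rw [heq]
        simp only [pvFinishB, if_pos hd']
        conv_rhs => rw [hsplit]
        simp
      | some j =>
        simp only [Option.map_some]
        have e2 : PySem.List.slice s (some ((PySem.Chars.find s [b0]) + (↑(j+1) : Int) + 1)) =
            s.drop (i + j + 2) := by
          rw [PySem.List.slice_from s (by omega)]
          congr 1
          omega
        have e3 : PySem.List.slice s (some ((PySem.Chars.find s [b0]) + 1))
              (some ((PySem.Chars.find s [b0]) + (↑(j+1) : Int))) = (s.drop (i+1)).take j := by
          rw [PySem.List.slice_toNat s (by omega) (by omega),
            show ((PySem.Chars.find s [b0]) + 1).toNat = i + 1 from by omega,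
            show ((PySem.Chars.find s [b0]) + (↑(j+1) : Int)).toNat = i + (j + 1) from by omega]
          congr 1
          omega
        rw [PySem.List.slice_to s h0, ← hi, e2, e3]
        conv_lhs => rw [hsplit, List.foldl_append, pvFoldB_pass b0 b1 _ hnotin,
          List.foldl_cons, pvStepB_open0 b1 rfl,
          pvFoldB_inner_some b0 b1 (s.drop (i+1)) 1 [] j Nat.one_pos
            (by exact_mod_cast hsc) (res ++ s.take i) acc]
        rw [← pvFoldB_pass b0 b1 (s.take i) hnotin res _ _, ← List.foldl_append]
        have hlen : (s.take i ++ ((s.drop (i+1)).drop (j+1))).length ≤ n := by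
          rw [List.length_append, List.length_take, List.length_drop, List.length_drop,
            Nat.min_eq_left (le_of_lt hlt)]
          omega
        rw [IH _ hlen res _ _]
        rw [List.drop_drop, show i + 1 + (j + 1) = i + j + 2 from by omega]
        simp
    · have hmem : b0 ∉ s := fun hm => h ((pvFind_pos_iff s b0).mpr hm)
      rw [pvLoopA, dif_neg h]
      rw [pvFoldB_pass b0 b1 s hmem]
      simp [pvFinishB]

-- ===== VERDICT (by name: the statement is the Claim_ definition above) =====
theorem separate_tags_spec : Claim_equal_separate_tags := by
  intro string brackets _ _
  unfold Spec_separate_tags separate_tags separate_tags_alt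
  rw [pvMain _ _ string.toList.length string.toList le_rfl]
  simp
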